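-- pv_equiv track=rewrite | github.com/miguimorell/RNN_STREAMLIT | RNN_STREAMLIT/user_input_processing.py | translate_input
-- ===== SOURCE A (Python) =====
-- def translate_input(user_input):
--
--     #Create simbols:  In a future cambiar por una llamada a un mapping
--     send_kick_data = []
--     send_snare_data = []
--     send_charles_data = []
--     for lista, sound in enumerate(user_input):
--         for index, data in enumerate(sound):
--             if lista == 0:
--                 if data == True:
--                     send_kick_data.append("36")
--                 else:
--                     send_kick_data.append("r")
--             elif lista == 1:
--                 if data == True:
--                     send_snare_data.append("38")
--                 else:
--                     send_snare_data.append("r")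
--             elif lista == 2:
--                 if data == True:
--                     send_charles_data.append("42")
--                 else:
--                     send_charles_data.append("r")
--
--     user_input = [send_kick_data, send_snare_data, send_charles_data]
--
--
--     #Create underscores"_"
--     modified_input = []
--     for lista in user_input:
--         modified_lista = []
--         prev_element = None
--         count_r = 0
--
--         for element in lista:
--             if element == "r":
--                 count_r += 1
--                 if count_r == 1:
--                     modified_lista.append(element)
--                 else:
--                     modified_lista.append("_")
--             else:
--                 modified_lista.append(element)
--                 count_r = 0
--
--         modified_input.append(modified_lista)
--
--     return modified_input
-- ===== SOURCE B (Python) =====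
-- def translate_input(user_input):
--     # Stateless pointwise formula: out[j] depends only on (row[j], row[j-1]).
--     rows = (user_input + [[], [], []])[:3]
--     return [
--         [note if d else ("r" if prev else "_")
--          for prev, d in zip([True] + row, row)]
--         for note, row in zip(("36", "38", "42"), rows)
--     ]
-- ===== Notes on version B (the rewrite author's own statement) =====
-- stated objective: simpler
-- what changed: A's two staged passes (enumerate-driven append loops, then a count_r run-length loop with mutable state) are replaced by a single stateless pointwise formula: each output symbol is computed directly from the pair (row[j-1], row[j]) by zipping each row with its shifted self, so no run counter or intermediate symbol lists exist.
import Mathlib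
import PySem

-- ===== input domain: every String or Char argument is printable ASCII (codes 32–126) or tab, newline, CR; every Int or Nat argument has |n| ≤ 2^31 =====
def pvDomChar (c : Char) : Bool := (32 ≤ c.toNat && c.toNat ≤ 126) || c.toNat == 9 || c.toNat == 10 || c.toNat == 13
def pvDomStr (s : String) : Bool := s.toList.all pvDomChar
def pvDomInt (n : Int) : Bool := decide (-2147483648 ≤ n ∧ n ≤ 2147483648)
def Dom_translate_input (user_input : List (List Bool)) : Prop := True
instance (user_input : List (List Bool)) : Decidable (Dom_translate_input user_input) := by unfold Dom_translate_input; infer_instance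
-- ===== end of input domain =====

-- B drops A's two staged passes and run-length counter entirely: each output symbol is a
-- stateless pointwise function of (row[j], row[j-1]) via zip with the shifted row (objective: simpler).

-- ===== PORT A =====
-- inner body of A's second loop (count_r accumulator), kept as a named step function
def pvStepA (st : List String × Int) (element : String) : List String × Int :=
  if element = "r" then
    if st.2 + 1 = 1 then (st.1 ++ [element], st.2 + 1) else (st.1 ++ ["_"], st.2 + 1)
  else (st.1 ++ [element], 0)

def translate_input (user_input : List (List Bool)) : List (List String) :=
  let acc := (PySem.List.enumerate user_input).foldl
    (fun (st : List String × List String × List String) p =>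
      (PySem.List.enumerate p.2).foldl
        (fun st q =>
          let data := q.2
          if p.1 = 0 then
            if data = true then (st.1 ++ ["36"], st.2.1, st.2.2) else (st.1 ++ ["r"], st.2.1, st.2.2)
          else if p.1 = 1 then
            if data = true then (st.1, st.2.1 ++ ["38"], st.2.2) else (st.1, st.2.1 ++ ["r"], st.2.2)
          else if p.1 = 2 then
            if data = true then (st.1, st.2.1, st.2.2 ++ ["42"]) else (st.1, st.2.1, st.2.2 ++ ["r"])
          else st) st)
    ([], [], [])
  let ui := [acc.1, acc.2.1, acc.2.2]
  ui.foldl (fun modified_input lista =>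
    modified_input ++ [(lista.foldl pvStepA ([], (0 : Int))).1]) []

-- ===== PORT B =====
def translate_input_alt (user_input : List (List Bool)) : List (List String) :=
  -- (user_input + [[], [], []])[:3]
  let rows := PySem.List.slice (user_input ++ [[], [], []]) none (some 3)
  -- zip(("36","38","42"), rows) with a per-element zip([True]+row, row) comprehension
  (["36", "38", "42"].zip rows).map (fun p =>
    ((true :: p.2).zip p.2).map (fun q => if q.2 then p.1 else if q.1 then "r" else "_"))

-- ===== PRECONDITION & SPEC =====
def Spec_translate_input (user_input : List (List Bool)) (out : List (List String)) : Prop := out = translate_input_alt user_input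
instance (user_input : List (List Bool)) (out : List (List String)) : Decidable (Spec_translate_input user_input out) := by unfold Spec_translate_input; infer_instance

-- ===== CLAIM =====
def Claim_equal_translate_input : Prop := ∀ (user_input : List (List Bool)), Dom_translate_input user_input → Spec_translate_input user_input (translate_input user_input)

-- ===== LEMMAS AND PROOFS =====

-- A's count_r loop as a structural recursion (proof helper)
def pvGo (c : Int) : List String → List String
  | [] => []
  | e :: t => if e = "r" then (if c + 1 = 1 then e else "_") :: pvGo (c + 1) t
              else e :: pvGo 0 t

theorem pvFoldA (l : List String) : ∀ (ml : List String) (c : Int),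
    (l.foldl pvStepA (ml, c)).1 = ml ++ pvGo c l := by
  induction l with
  | nil => intro ml c; simp [pvGo]
  | cons e t ih =>
    intro ml c
    simp only [List.foldl_cons, pvStepA, pvGo]
    split_ifs with h1 h2 <;> simp [ih]

-- B's per-row transform, named for the proofs
def pvRowB (note : String) (row : List Bool) : List String :=
  ((true :: row).zip row).map (fun q => if q.2 then note else if q.1 then "r" else "_")

-- the run-length state c matches the "previous element was a note" flag prev
theorem pvRowEq (note : String) (hn : note ≠ "r") :
    ∀ (row : List Bool) (prev : Bool) (c : Int), (c = 0 ↔ prev = true) → 0 ≤ c →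
    pvGo c (row.map (fun d => if d then note else "r")) =
      ((prev :: row).zip row).map (fun q => if q.2 then note else if q.1 then "r" else "_") := by
  intro row
  induction row with
  | nil => intro prev c _ _; simp [pvGo]
  | cons d t ih =>
    intro prev c hc hc0
    cases d with
    | true =>
      simp only [List.map_cons, if_true, List.zip_cons_cons]
      rw [pvGo, if_neg hn, ih true 0 (by simp) (by omega)]
    | false =>
      simp only [List.map_cons, Bool.false_eq_true, if_false, List.zip_cons_cons, List.map_cons]
      rw [pvGo, if_pos rfl,
        ih false (c + 1) (by simp only [Bool.false_eq_true, iff_false]; omega) (by omega)]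
      have h1 : (c + 1 = 1) = (prev = true) := by
        apply propext; constructor
        · intro h; exact hc.mp (by omega)
        · intro h; have := hc.mpr h; omega
      simp [h1]

-- symbol maps
def pvF0 (d : Bool) : String := if d then "36" else "r"
def pvF1 (d : Bool) : String := if d then "38" else "r"
def pvF2 (d : Bool) : String := if d then "42" else "r"

-- A's inner loop over one sound list, by its index
theorem pvInner (sound : List Bool) : ∀ (lista s : Int) (st : List String × List String × List String),
    (PySem.List.enumerate sound s).foldl
      (fun st q =>
        let data := q.2
        if lista = 0 then
          if data = true then (st.1 ++ ["36"], st.2.1, st.2.2) else (st.1 ++ ["r"], st.2.1, st.2.2)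
        else if lista = 1 then
          if data = true then (st.1, st.2.1 ++ ["38"], st.2.2) else (st.1, st.2.1 ++ ["r"], st.2.2)
        else if lista = 2 then
          if data = true then (st.1, st.2.1, st.2.2 ++ ["42"]) else (st.1, st.2.1, st.2.2 ++ ["r"])
        else st) st =
    (if lista = 0 then (st.1 ++ sound.map pvF0, st.2.1, st.2.2)
     else if lista = 1 then (st.1, st.2.1 ++ sound.map pvF1, st.2.2)
     else if lista = 2 then (st.1, st.2.1, st.2.2 ++ sound.map pvF2)
     else st) := by
  induction sound with
  | nil => intro lista s st; simp [PySem.List.enumerate_nil]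
  | cons d t ih =>
    intro lista s st
    rw [PySem.List.enumerate_cons, List.foldl_cons, ih]
    simp only [pvF0, pvF1, pvF2, List.map_cons]
    split_ifs with h0 hd h1 hd h2 hd <;> simp_all

-- rows with index ≥ 3 leave the accumulator unchanged
theorem pvOuterHigh (rest : List (List Bool)) : ∀ (s : Int), 3 ≤ s →
    ∀ (st : List String × List String × List String),
    (PySem.List.enumerate rest s).foldl
      (fun (st : List String × List String × List String) p =>
        (PySem.List.enumerate p.2).foldl
          (fun st q =>
            let data := q.2
            if p.1 = 0 then
              if data = true then (st.1 ++ ["36"], st.2.1, st.2.2) else (st.1 ++ ["r"], st.2.1, st.2.2)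
            else if p.1 = 1 then
              if data = true then (st.1, st.2.1 ++ ["38"], st.2.2) else (st.1, st.2.1 ++ ["r"], st.2.2)
            else if p.1 = 2 then
              if data = true then (st.1, st.2.1, st.2.2 ++ ["42"]) else (st.1, st.2.1, st.2.2 ++ ["r"])
            else st) st) st = st := by
  induction rest with
  | nil => intro s _ st; simp [PySem.List.enumerate_nil]
  | cons a t ih =>
    intro s hs st
    rw [PySem.List.enumerate_cons, List.foldl_cons, pvInner]
    have h0 : ¬ (s = 0) := by omega
    have h1 : ¬ (s = 1) := by omega
    have h2 : ¬ (s = 2) := by omega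
    simp only [h0, h1, h2, if_false]
    exact ih (s + 1) (by omega) st

-- row i of the input (user_input[i] if present, else [])
def pvRow (ui : List (List Bool)) (k : Nat) : List Bool := ui.getD k []

theorem pvA_eq (ui : List (List Bool)) :
    translate_input ui =
      [pvGo 0 ((pvRow ui 0).map pvF0), pvGo 0 ((pvRow ui 1).map pvF1),
       pvGo 0 ((pvRow ui 2).map pvF2)] := by
  have key : ∀ l : List String, (l.foldl pvStepA ([], (0:Int))).1 = pvGo 0 l := by
    intro l; rw [pvFoldA l [] 0]; simp
  have phase1 :
      ((PySem.List.enumerate ui).foldl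
        (fun (st : List String × List String × List String) p =>
          (PySem.List.enumerate p.2).foldl
            (fun st q =>
              let data := q.2
              if p.1 = 0 then
                if data = true then (st.1 ++ ["36"], st.2.1, st.2.2) else (st.1 ++ ["r"], st.2.1, st.2.2)
              else if p.1 = 1 then
                if data = true then (st.1, st.2.1 ++ ["38"], st.2.2) else (st.1, st.2.1 ++ ["r"], st.2.2)
              else if p.1 = 2 then
                if data = true then (st.1, st.2.1, st.2.2 ++ ["42"]) else (st.1, st.2.1, st.2.2 ++ ["r"])
              else st) st)
        ([], [], [])) =
      ((pvRow ui 0).map pvF0, (pvRow ui 1).map pvF1, (pvRow ui 2).map pvF2) := by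
    match ui with
    | [] => simp [PySem.List.enumerate_nil, pvRow]
    | [a] =>
      rw [show PySem.List.enumerate [a] = PySem.List.enumerate [a] 0 from rfl]
      rw [PySem.List.enumerate_cons, PySem.List.enumerate_nil, List.foldl_cons, pvInner]
      simp [pvRow]
    | [a, b] =>
      rw [show PySem.List.enumerate [a, b] = PySem.List.enumerate [a, b] 0 from rfl]
      rw [PySem.List.enumerate_cons, PySem.List.enumerate_cons, PySem.List.enumerate_nil,
        List.foldl_cons, pvInner, List.foldl_cons, pvInner]
      norm_num
      simp [pvRow]
    | a :: b :: c :: rest =>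
      rw [show PySem.List.enumerate (a :: b :: c :: rest) = PySem.List.enumerate (a :: b :: c :: rest) 0 from rfl]
      rw [PySem.List.enumerate_cons, PySem.List.enumerate_cons, PySem.List.enumerate_cons,
        List.foldl_cons, pvInner, List.foldl_cons, pvInner, List.foldl_cons, pvInner]
      norm_num
      rw [pvOuterHigh rest 3 (by omega)]
      simp [pvRow]
  unfold translate_input
  simp only [phase1]
  simp [key]

theorem pvB_eq (ui : List (List Bool)) :
    translate_input_alt ui =
      [pvRowB "36" (pvRow ui 0), pvRowB "38" (pvRow ui 1), pvRowB "42" (pvRow ui 2)] := by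
  unfold translate_input_alt pvRowB
  have h3 : PySem.List.slice (ui ++ [[], [], []]) none (some 3) =
      [pvRow ui 0, pvRow ui 1, pvRow ui 2] := by
    rw [show ((3:Int)) = ((3:Nat):Int) from rfl, PySem.List.slice_to_natCast]
    match ui with
    | [] => simp [pvRow]
    | [a] => simp [pvRow]
    | [a, b] => simp [pvRow]
    | a :: b :: c :: rest => simp [pvRow, List.take_succ_cons]
  rw [h3]
  rfl

-- ===== VERDICT =====
theorem translate_input_spec : Claim_equal_translate_input := by
  intro ui _
  unfold Spec_translate_input
  rw [pvA_eq, pvB_eq]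
  have h36 : ("36":String) ≠ "r" := by decide
  have h38 : ("38":String) ≠ "r" := by decide
  have h42 : ("42":String) ≠ "r" := by decide
  rw [show pvF0 = (fun d => if d then "36" else "r") from rfl,
      show pvF1 = (fun d => if d then "38" else "r") from rfl,
      show pvF2 = (fun d => if d then "42" else "r") from rfl,
      pvRowEq "36" h36 _ true 0 (by simp) (by omega),
      pvRowEq "38" h38 _ true 0 (by simp) (by omega),
      pvRowEq "42" h42 _ true 0 (by simp) (by omega)]
  rfl
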